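-- pv_equiv track=rewrite | github.com/takehiro1111/serverless | tutorial/func/test3.py | find_bills
-- ===== SOURCE A (Python) =====
-- def find_bills(N, Y):
--    # 10000円札の枚数を0からNまで試す
--    for x10k in range(N + 1):
--        # 5000円札の枚数を0から(N - 10000円札の枚数)まで試す
--        for x5k in range(N + 1 - x10k):
--            # 1000円札の枚数は全体の枚数から10000円札と5000円札を引いた残り
--            x1k = N - x10k - x5k
--
--            # 各紙幣の合計金額を計算
--            total = 10000 * x10k + 5000 * x5k + 1000 * x1k
--
--            # 計算した合計金額が目標金額と一致し、1000円札が0以上なら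
--            if total == Y and x1k >= 0:
--                # 見つかった組み合わせを返す
--                return x10k, x5k, x1k
--
--    # どの組み合わせも条件を満たさない場合は-1を返す
--    return -1, -1, -1
-- ===== SOURCE B (Python) =====
-- def find_bills(N, Y):
--     # Fix the 10000-yen count x10k; then 10000*x10k + 5000*x5k + 1000*(N-x10k-x5k) = Y
--     # gives 4000*x5k = Y - 1000*N - 9000*x10k, so x5k is determined uniquely.
--     for x10k in range(N + 1):
--         r = Y - 1000 * N - 9000 * x10k
--         if r >= 0 and r % 4000 == 0 and r // 4000 <= N - x10k:
--             x5k = r // 4000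
--             return x10k, x5k, N - x10k - x5k
--     return -1, -1, -1
-- ===== Notes on version B (the rewrite author's own statement) =====
-- stated objective: faster
-- what changed: Replaced the nested brute-force scan over (x10k, x5k) pairs by a single loop over x10k that solves the linear equation 4000*x5k = Y - 1000*N - 9000*x10k for the unique x5k and checks divisibility and range.
import Mathlib
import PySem

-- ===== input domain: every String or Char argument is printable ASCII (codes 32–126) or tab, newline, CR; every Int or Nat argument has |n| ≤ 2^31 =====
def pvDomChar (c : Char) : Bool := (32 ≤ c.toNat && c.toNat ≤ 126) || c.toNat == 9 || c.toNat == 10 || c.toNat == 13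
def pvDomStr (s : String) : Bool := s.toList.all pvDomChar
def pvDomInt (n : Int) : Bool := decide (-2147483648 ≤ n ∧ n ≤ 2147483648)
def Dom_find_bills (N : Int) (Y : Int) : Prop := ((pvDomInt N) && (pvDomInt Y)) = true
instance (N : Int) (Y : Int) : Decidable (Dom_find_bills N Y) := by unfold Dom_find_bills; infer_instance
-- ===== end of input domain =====

-- B replaces A's quadratic scan over (x10k, x5k) pairs by a single loop over x10k that
-- solves the linear equation for the unique x5k (faster: O(N^2) → O(N)).

-- ===== PORT A =====
-- the nested for-loops with early `return` become nested findSome? over the same ranges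
def find_bills (N : Int) (Y : Int) : List Int :=
  ((PySem.List.pyRange 0 (N + 1) 1).findSome? (fun x10k =>
    (PySem.List.pyRange 0 (N + 1 - x10k) 1).findSome? (fun x5k =>
      let x1k := N - x10k - x5k
      let total := 10000 * x10k + 5000 * x5k + 1000 * x1k
      if total = Y ∧ x1k ≥ 0 then some [x10k, x5k, x1k] else none))).getD [-1, -1, -1]

-- ===== PORT B =====
-- single loop over x10k; x5k is forced by 4000*x5k = Y - 1000*N - 9000*x10k
def find_bills_alt (N : Int) (Y : Int) : List Int :=
  ((PySem.List.pyRange 0 (N + 1) 1).findSome? (fun x10k =>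
    let r := Y - 1000 * N - 9000 * x10k
    if r ≥ 0 ∧ PySem.Int.mod r 4000 = 0 ∧ PySem.Int.floordiv r 4000 ≤ N - x10k then
      some [x10k, PySem.Int.floordiv r 4000, N - x10k - PySem.Int.floordiv r 4000]
    else none)).getD [-1, -1, -1]

-- ===== PRECONDITION & SPEC =====
def Spec_find_bills (N : Int) (Y : Int) (out : List Int) : Prop := out = find_bills_alt N Y
instance (N : Int) (Y : Int) (out : List Int) : Decidable (Spec_find_bills N Y out) := by unfold Spec_find_bills; infer_instance

-- ===== CLAIM (what is proved, stated in full; the proofs are below) =====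
def Claim_equal_find_bills : Prop := ∀ (N : Int) (Y : Int), Dom_find_bills N Y → Spec_find_bills N Y (find_bills N Y)

-- ===== LEMMAS AND PROOFS =====

-- findSome? over List.range with a unique hit returns the value at the hit
theorem findSome?_range_unique {α : Type} (f : Nat → Option α) (n b₀ : Nat)
    (hb : b₀ < n) (hnone : ∀ b, b < n → b ≠ b₀ → f b = none) :
    (List.range n).findSome? f = f b₀ := by
  induction n with
  | zero => omega
  | succ n ih =>
    rw [List.range_succ, List.findSome?_append]
    rcases Nat.lt_or_ge b₀ n with h | h
    · rw [ih h (fun b hbn hne => hnone b (by omega) hne)]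
      simp [hnone n (by omega) (by omega)]
    · have hb0 : b₀ = n := by omega
      have : (List.range n).findSome? f = none := by
        rw [List.findSome?_eq_none_iff]
        intro b hbmem
        exact hnone b (by
          have := List.mem_range.mp hbmem; omega) (by
          have := List.mem_range.mp hbmem; omega)
      rw [this, hb0]
      simp [List.findSome?_singleton]

theorem findSome?_range_none {α : Type} (f : Nat → Option α) (n : Nat)
    (hnone : ∀ b, b < n → f b = none) :
    (List.range n).findSome? f = none := by
  rw [List.findSome?_eq_none_iff]
  intro b hbmem
  exact hnone b (List.mem_range.mp hbmem)

-- the inner loop of A equals B's closed-form body, for every x10k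
theorem inner_eq (N Y a : Int) :
    ((PySem.List.pyRange 0 (N + 1 - a) 1).findSome? (fun x5k =>
      let x1k := N - a - x5k
      let total := 10000 * a + 5000 * x5k + 1000 * x1k
      if total = Y ∧ x1k ≥ 0 then some [a, x5k, x1k] else none))
    = (let r := Y - 1000 * N - 9000 * a
       if r ≥ 0 ∧ PySem.Int.mod r 4000 = 0 ∧ PySem.Int.floordiv r 4000 ≤ N - a then
         some [a, PySem.Int.floordiv r 4000, N - a - PySem.Int.floordiv r 4000]
       else none) := by
  set r : Int := Y - 1000 * N - 9000 * a with hr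
  rcases le_or_gt (N + 1 - a) 0 with hm | hm
  · -- inner range empty; B's range check must also fail
    have hempty : PySem.List.pyRange 0 (N + 1 - a) 1 = [] := by
      rw [List.eq_nil_iff_forall_not_mem]
      intro x hx
      have := PySem.List.mem_pyRange_one.mp hx
      omega
    rw [hempty]
    have : ¬ (r ≥ 0 ∧ PySem.Int.mod r 4000 = 0 ∧ PySem.Int.floordiv r 4000 ≤ N - a) := by
      rintro ⟨hr0, hmod, hle⟩
      have hdiv : PySem.Int.floordiv r 4000 = r / 4000 :=
        PySem.Int.floordiv_eq_ediv_of_pos (by omega)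
      have : 0 ≤ r / 4000 := Int.ediv_nonneg hr0 (by omega)
      omega
    rw [List.findSome?_nil, if_neg this]
  · have hmnat : N + 1 - a = ((N + 1 - a).toNat : Int) := by omega
    rw [hmnat, PySem.List.pyRange_zero_natCast, List.findSome?_map]
    set n : Nat := (N + 1 - a).toNat with hn
    have hdvd := PySem.Int.mod_eq_zero_iff_dvd r 4000
    by_cases hC : r ≥ 0 ∧ PySem.Int.mod r 4000 = 0 ∧ PySem.Int.floordiv r 4000 ≤ N - a
    · obtain ⟨hr0, hmod, hle⟩ := hC
      have hdiv : PySem.Int.floordiv r 4000 = r / 4000 :=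
        PySem.Int.floordiv_eq_ediv_of_pos (by omega)
      obtain ⟨q, hq⟩ := hdvd.mp hmod
      have hq0 : 0 ≤ q := by omega
      have hqd : r / 4000 = q := by omega
      rw [hdiv] at hle
      rw [hqd] at hle
      have hk : q.toNat < n := by omega
      rw [findSome?_range_unique _ n q.toNat hk]
      · simp only [Function.comp]
        have hcast : (q.toNat : Int) = q := by omega
        rw [hcast]
        have hcond : 10000 * a + 5000 * q + 1000 * (N - a - q) = Y ∧ N - a - q ≥ 0 := by
          constructor <;> omega
        simp only [hcond, and_self, if_true, hdiv, hqd]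
        rw [if_pos ⟨hr0, hmod, hle⟩]
      · intro b hbn hbne
        simp only [Function.comp]
        have hne2 : ¬ (10000 * a + 5000 * (b : Int) + 1000 * (N - a - b) = Y ∧ N - a - (b : Int) ≥ 0) := by
          rintro ⟨heq, _⟩
          have : (b : Int) = q := by omega
          omega
        simp only [hne2, if_false]
    · rw [findSome?_range_none]
      · rw [if_neg hC]
      · intro b hbn
        simp only [Function.comp]
        have hne2 : ¬ (10000 * a + 5000 * (b : Int) + 1000 * (N - a - b) = Y ∧ N - a - (b : Int) ≥ 0) := by
          rintro ⟨heq, hge⟩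
          have h4 : 4000 * (b : Int) = r := by omega
          have hbnI : (b : Int) < N + 1 - a := by omega
          apply hC
          refine ⟨by omega, hdvd.mpr ⟨b, by omega⟩, ?_⟩
          rw [PySem.Int.floordiv_eq_ediv_of_pos (by omega)]
          have : r / 4000 = (b : Int) := by omega
          omega
        simp only [hne2, if_false]

-- ===== VERDICT (by name: the statement is the Claim_ definition above) =====
theorem find_bills_spec : Claim_equal_find_bills := by
  intro N Y _
  unfold Spec_find_bills find_bills find_bills_alt
  congr 2
  funext a
  exact inner_eq N Y a
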